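-- pv_equiv track=rewrite | github.com/thepratholic/LeetCode-and-GFG-Daily-POTD | GeeksforGeeks/Maximum People Visible in a Line.py | maxPeople
-- ===== SOURCE A (Python) =====
-- def maxPeople(arr):
--     n = len(arr)
--     pge = [-1] * n
--     nge = [n] * n
--     stack = []
--
--     for i in range(n):
--         while stack and arr[stack[-1]] < arr[i]:
--             stack.pop()
--
--         pge[i] = stack[-1] if stack else -1
--         stack.append(i)
--
--     stack.clear()
--
--     for i in range(n - 1, -1, -1):
--         while stack and arr[stack[-1]] < arr[i]:
--             stack.pop()
--
--         nge[i] = stack[-1] if stack else n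
--
--         stack.append(i)
--
--     ans = 0
--
--     for i in range(n):
--         left = i - pge[i] - 1
--         right = nge[i] - i - 1
--         ans = max(ans, left + right + 1)
--
--     return ans
-- ===== SOURCE B (Python) =====
-- def maxPeople(arr):
--     n = len(arr)
--     if n == 0:
--         return 0
--     m = max(arr)
--     pos = [i for i, v in enumerate(arr) if v == m]
--     best = 0
--     for j in range(len(pos)):
--         lo = pos[j - 1] if j > 0 else -1
--         hi = pos[j + 1] if j + 1 < len(pos) else n
--         best = max(best, hi - lo - 1)
--     return best
-- ===== Notes on version B (the rewrite author's own statement) =====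
-- stated objective: simpler
-- what changed: Replaces the two monotonic-stack passes and the pge/nge arrays by one pass collecting the positions of the global maximum and a closed-form gap computation over consecutive maximum positions (the widest visibility window is always centred on a global maximum).
import Mathlib
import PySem

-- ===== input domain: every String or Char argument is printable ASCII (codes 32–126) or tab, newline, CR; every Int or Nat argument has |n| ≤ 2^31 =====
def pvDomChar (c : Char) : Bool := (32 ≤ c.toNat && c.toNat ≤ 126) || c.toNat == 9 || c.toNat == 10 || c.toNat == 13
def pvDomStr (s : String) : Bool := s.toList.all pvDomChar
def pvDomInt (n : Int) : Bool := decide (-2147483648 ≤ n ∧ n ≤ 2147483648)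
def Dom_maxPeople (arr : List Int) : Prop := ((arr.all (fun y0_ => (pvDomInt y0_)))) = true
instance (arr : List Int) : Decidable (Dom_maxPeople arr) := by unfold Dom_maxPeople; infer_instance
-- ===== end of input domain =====

-- B replaces A's two monotonic-stack passes by one collection of the global-maximum
-- positions and a closed-form gap loop over them (objective: simpler).

-- ===== PORT A =====
-- The Python stack holds indices 0..n-1 (naturals); it is kept top-first here
-- (Python appends, pops and reads stack[-1] at the end).  The inner
-- 'while stack and arr[stack[-1]] < x: stack.pop()' loop:
def popWhileA (arr : List Int) (x : Int) : List Nat → List Nat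
  | [] => []
  | t :: rest =>
      -- arr[stack[-1]]: the stack only ever holds in-range indices, so getD is exact
      if arr.getD t 0 < x then popWhileA arr x rest else t :: rest

-- one iteration of the first for-loop: pop, pge[i] = stack[-1] if stack else -1, push i
def loop1Body (arr : List Int) (st : List Int × List Nat) (i : Nat) : List Int × List Nat :=
  let s := popWhileA arr (arr.getD i 0) st.2
  (st.1.set i (match s with | [] => -1 | t :: _ => (t : Int)), i :: s)

-- one iteration of the second for-loop: pop, nge[i] = stack[-1] if stack else n, push i
def loop2Body (arr : List Int) (n : Nat) (st : List Int × List Nat) (i : Nat) : List Int × List Nat :=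
  let s := popWhileA arr (arr.getD i 0) st.2
  (st.1.set i (match s with | [] => (n : Int) | t :: _ => (t : Int)), i :: s)

def maxPeople (arr : List Int) : Int :=
  let n := arr.length
  -- pge = [-1]*n; for i in range(n): …  (the loop carries the pair (pge, stack))
  let pge := ((List.range n).foldl (loop1Body arr) (List.replicate n (-1), [])).1
  -- nge = [n]*n; stack.clear(); for i in range(n-1, -1, -1): …
  let nge := ((List.range n).reverse.foldl (loop2Body arr n) (List.replicate n (n : Int), [])).1
  -- ans = 0; for i in range(n): ans = max(ans, left + right + 1)
  (List.range n).foldl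
    (fun (ans : Int) (i : Nat) =>
      let left := (i : Int) - pge.getD i 0 - 1
      let right := nge.getD i 0 - (i : Int) - 1
      max ans (left + right + 1)) 0

-- ===== PORT B =====
def maxPeople_alt (arr : List Int) : Int :=
  let n := arr.length
  if n = 0 then 0
  else
    let m := (PySem.List.max? arr (fun v => v)).getD 0   -- m = max(arr); arr ≠ [], so some
    -- pos = [i for i, v in enumerate(arr) if v == m]
    let pos : List Int := ((PySem.List.enumerate arr 0).filter (fun p => p.2 == m)).map (fun p => p.1)
    -- for j in range(len(pos)): lo/hi via neighbours or the sentinels -1 / n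
    (List.range pos.length).foldl
      (fun best j =>
        let lo : Int := if 0 < j then pos.getD (j - 1) 0 else -1
        let hi : Int := if j + 1 < pos.length then pos.getD (j + 1) 0 else (n : Int)
        max best (hi - lo - 1)) 0

-- ===== PRECONDITION & SPEC =====
def Spec_maxPeople (arr : List Int) (out : Int) : Prop := out = maxPeople_alt arr
instance (arr : List Int) (out : Int) : Decidable (Spec_maxPeople arr out) := by unfold Spec_maxPeople; infer_instance

-- ===== CLAIM (what is proved, stated in full; the proofs are below) =====
def Claim_equal_maxPeople : Prop := ∀ (arr : List Int), Dom_maxPeople arr → Spec_maxPeople arr (maxPeople arr)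

-- ===== LEMMAS AND PROOFS =====

-- ---- specification-side walks: nearest index with value ≥ x, to the left / right ----

-- walkL arr x i = greatest j < i with arr[j] ≥ x, else -1 (scanning downwards)
def walkL (arr : List Int) (x : Int) : Nat → Int
  | 0 => -1
  | j+1 => if arr.getD j 0 < x then walkL arr x j else (j : Int)

-- walkR arr x n k = least j with k ≤ j < n and arr[j] ≥ x, else n
def walkR (arr : List Int) (x : Int) (n k : Nat) : Int :=
  if k < n then (if arr.getD k 0 < x then walkR arr x n (k+1) else (k : Int)) else (n : Int)
  termination_by n - k

def headL : List Nat → Int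
  | [] => -1
  | t :: _ => (t : Int)

def headR (n : Nat) : List Nat → Int
  | [] => (n : Int)
  | t :: _ => (t : Int)

-- the stack after the forward pass has processed indices 0..i-1 (top first)
def stkL (arr : List Int) : Nat → List Nat
  | 0 => []
  | i+1 => i :: popWhileA arr (arr.getD i 0) (stkL arr i)

-- the stack after the backward pass has processed indices n-1..k (top first)
def stkR (arr : List Int) (n k : Nat) : List Nat :=
  if k < n then k :: popWhileA arr (arr.getD k 0) (stkR arr n (k+1)) else []
  termination_by n - k

lemma popWhileA_popWhileA (arr : List Int) {x y : Int} (h : y ≤ x) :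
    ∀ s, popWhileA arr x (popWhileA arr y s) = popWhileA arr x s := by
  intro s
  induction s with
  | nil => rfl
  | cons t rest ih =>
      show popWhileA arr x (if arr.getD t 0 < y then popWhileA arr y rest else t :: rest) =
        if arr.getD t 0 < x then popWhileA arr x rest else t :: rest
      by_cases hy : arr.getD t 0 < y
      · rw [if_pos hy, if_pos (lt_of_lt_of_le hy h), ih]
      · rw [if_neg hy]
        rfl

lemma headL_pop (arr : List Int) : ∀ i x, headL (popWhileA arr x (stkL arr i)) = walkL arr x i := by
  intro i
  induction i with
  | zero => intro x; rfl
  | succ i ih =>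
      intro x
      show headL (if arr.getD i 0 < x
          then popWhileA arr x (popWhileA arr (arr.getD i 0) (stkL arr i))
          else i :: popWhileA arr (arr.getD i 0) (stkL arr i)) =
        if arr.getD i 0 < x then walkL arr x i else (i : Int)
      by_cases hx : arr.getD i 0 < x
      · rw [if_pos hx, if_pos hx, popWhileA_popWhileA arr (le_of_lt hx), ih x]
      · rw [if_neg hx, if_neg hx]
        rfl

lemma headR_pop (arr : List Int) (n : Nat) : ∀ d k x, n - k = d →
    headR n (popWhileA arr x (stkR arr n k)) = walkR arr x n k := by
  intro d
  induction d with
  | zero =>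
      intro k x hd
      have hk : ¬ k < n := by omega
      rw [stkR, if_neg hk, walkR, if_neg hk]
      rfl
  | succ d ih =>
      intro k x hd
      have hk : k < n := by omega
      rw [stkR, if_pos hk, walkR, if_pos hk]
      show headR n (if arr.getD k 0 < x
          then popWhileA arr x (popWhileA arr (arr.getD k 0) (stkR arr n (k+1)))
          else k :: popWhileA arr (arr.getD k 0) (stkR arr n (k+1))) =
        if arr.getD k 0 < x then walkR arr x n (k+1) else (k : Int)
      by_cases hx : arr.getD k 0 < x
      · rw [if_pos hx, if_pos hx, popWhileA_popWhileA arr (le_of_lt hx), ih (k+1) x (by omega)]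
      · rw [if_neg hx, if_neg hx]
        rfl

-- setting index N of a map-over-range
lemma set_map_range {α : Type} (g : Nat → α) (n N : Nat) (v : α) (_hN : N < n) :
    ((List.range n).map g).set N v = (List.range n).map (fun i => if i = N then v else g i) := by
  apply List.ext_getElem
  · simp
  · intro i h1 h2
    simp only [List.getElem_set, List.getElem_map, List.getElem_range]
    rcases eq_or_ne N i with h | h
    · simp [h]
    · simp [h, (Ne.symm h : i ≠ N)]

lemma match_eq_headL (s : List Nat) :
    (match s with | [] => (-1 : Int) | t :: _ => (t : Int)) = headL s := by cases s <;> rfl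

lemma match_eq_headR (n : Nat) (s : List Nat) :
    (match s with | [] => ((n : Nat) : Int) | t :: _ => (t : Int)) = headR n s := by cases s <;> rfl

lemma pass1 (arr : List Int) : ∀ N, N ≤ arr.length →
    (List.range N).foldl (loop1Body arr) (List.replicate arr.length (-1), []) =
    ((List.range arr.length).map (fun i => if i < N then walkL arr (arr.getD i 0) i else -1),
      stkL arr N) := by
  intro N
  induction N with
  | zero =>
      intro _
      simp only [List.range_zero, List.foldl_nil, Prod.mk.injEq]
      refine ⟨?_, rfl⟩
      rw [show (List.range arr.length).map
              (fun i => if i < 0 then walkL arr (arr.getD i 0) i else (-1 : Int))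
            = (List.range arr.length).map (fun _ => (-1 : Int)) from
          List.map_congr_left (by intro i _; simp)]
      simp [List.map_const']
  | succ N ih =>
      intro hN
      rw [List.range_succ, List.foldl_append, List.foldl_cons, List.foldl_nil, ih (by omega)]
      simp only [loop1Body, Prod.mk.injEq]
      refine ⟨?_, rfl⟩
      rw [match_eq_headL, headL_pop arr N (arr.getD N 0),
        set_map_range _ _ _ _ (by omega)]
      apply List.map_congr_left
      intro i hi
      simp only [List.mem_range] at hi
      rcases eq_or_ne i N with hiN | hiN
      · subst hiN; simp
      · have h2 : i < N + 1 ↔ i < N := by omega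
        simp [hiN, h2]

lemma pass2 (arr : List Int) (n : Nat) : ∀ k, k ≤ n →
    ((List.range k).reverse).foldl (loop2Body arr n)
      ((List.range n).map (fun i => if k ≤ i then walkR arr (arr.getD i 0) n (i+1) else (n : Int)),
        stkR arr n k)
    = ((List.range n).map (fun i => walkR arr (arr.getD i 0) n (i+1)), stkR arr n 0) := by
  intro k
  induction k with
  | zero =>
      intro _
      simp only [List.range_zero, List.reverse_nil, List.foldl_nil, Prod.mk.injEq]
      exact ⟨List.map_congr_left (by intro i _; simp), trivial⟩
  | succ k ih =>
      intro hk
      rw [List.range_succ, List.reverse_append, List.reverse_singleton, List.singleton_append,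
        List.foldl_cons]
      have hstep : loop2Body arr n
          ((List.range n).map (fun i => if k + 1 ≤ i then walkR arr (arr.getD i 0) n (i+1) else (n : Int)),
            stkR arr n (k+1)) k
          = ((List.range n).map (fun i => if k ≤ i then walkR arr (arr.getD i 0) n (i+1) else (n : Int)),
              stkR arr n k) := by
        simp only [loop2Body, Prod.mk.injEq]
        constructor
        · rw [match_eq_headR, headR_pop arr n (n - (k+1)) (k+1) (arr.getD k 0) rfl,
            set_map_range _ _ _ _ (by omega)]
          apply List.map_congr_left
          intro i hi
          simp only [List.mem_range] at hi
          rcases eq_or_ne i k with hik | hik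
          · subst hik; simp
          · have h2 : k ≤ i ↔ k + 1 ≤ i := by omega
            simp [hik, h2]
        · conv_rhs => rw [stkR, if_pos (by omega : k < n)]
      rw [hstep, ih (by omega)]

-- the visibility window of index i (A computes its size for every i and maximises)
def span (arr : List Int) (i : Nat) : Int :=
  walkR arr (arr.getD i 0) arr.length (i+1) - walkL arr (arr.getD i 0) i - 1

lemma A_eq (arr : List Int) :
    maxPeople arr = (List.range arr.length).foldl (fun a i => max a (span arr i)) 0 := by
  unfold maxPeople
  simp only
  rw [pass1 arr arr.length (le_refl _)]
  rw [show (List.replicate arr.length ((arr.length : Nat) : Int), ([] : List Nat))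
        = ((List.range arr.length).map
            (fun i => if arr.length ≤ i then walkR arr (arr.getD i 0) arr.length (i+1)
                      else ((arr.length : Nat) : Int)),
           stkR arr arr.length arr.length) by
      refine Prod.ext ?_ ?_
      · simp only
        rw [show (List.range arr.length).map
              (fun i => if arr.length ≤ i then walkR arr (arr.getD i 0) arr.length (i+1)
                        else ((arr.length : Nat) : Int))
            = (List.range arr.length).map (fun _ => ((arr.length : Nat) : Int)) from
          List.map_congr_left (by
            intro i hi
            simp only [List.mem_range] at hi
            rw [if_neg (by omega)])]
        simp [List.map_const']
      · simp only
        rw [stkR, if_neg (by omega)]]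
  rw [pass2 arr arr.length arr.length (le_refl _)]
  apply PySem.List.foldl_congr_mem
  intro a i hi
  simp only [List.mem_range] at hi
  rw [PySem.List.getD_map_range (h := hi), PySem.List.getD_map_range (h := hi)]
  rw [if_pos hi]
  show max a ((i : Int) - walkL arr (arr.getD i 0) i - 1
      + (walkR arr (arr.getD i 0) arr.length (i+1) - (i : Int) - 1) + 1) = _
  unfold span
  congr 1
  ring

-- ---- the global maximum, its positions, and B's gaps ----

def predM (arr : List Int) (M : Int) : Nat → Bool := fun i => arr.getD i 0 == M

def PPos (arr : List Int) (M : Int) : List Nat := (List.range arr.length).filter (predM arr M)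

def lastInt (l : List Nat) : Int := match l.getLast? with | none => -1 | some t => (t : Int)

def gapOf (PP : List Nat) (n j : Nat) : Int :=
  (if j + 1 < PP.length then ((PP.getD (j+1) 0 : Nat) : Int) else (n : Int))
  - (if 0 < j then ((PP.getD (j-1) 0 : Nat) : Int) else -1) - 1

lemma enum_filter_map (m : Int) : ∀ (l : List Int) (s : Int),
    ((PySem.List.enumerate l s).filter (fun p => p.2 == m)).map (fun p => p.1)
    = ((List.range l.length).filter (fun i => l.getD i 0 == m)).map (fun (i : Nat) => s + (i : Int)) := by
  intro l
  induction l with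
  | nil => intro s; simp [PySem.List.enumerate]
  | cons a t ih =>
      intro s
      have htail : ((PySem.List.enumerate t (s+1)).filter (fun p => p.2 == m)).map (fun p => p.1)
          = (((List.range t.length).map Nat.succ).filter
              (fun i => (a :: t).getD i 0 == m)).map (fun (i : Nat) => s + (i : Int)) := by
        rw [List.filter_map, List.map_map]
        rw [List.filter_congr (q := fun i => t.getD i 0 == m)
          (by intro x _; simp)]
        rw [ih (s+1)]
        apply List.map_congr_left
        intro i _
        simp only [Function.comp_apply, Nat.succ_eq_add_one]
        push_cast
        ring
      rw [PySem.List.enumerate_cons, List.length_cons, List.range_succ_eq_map,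
        List.filter_cons, List.filter_cons]
      simp only [List.getD_cons_zero]
      by_cases ham : (a == m) = true
      · rw [if_pos ham, if_pos ham, List.map_cons, List.map_cons, htail]
        simp
      · rw [if_neg ham, if_neg ham, htail]

lemma getD_map_cast (l : List Nat) (k : Nat) (h : k < l.length) :
    (l.map (fun i : Nat => (i : Int))).getD k 0 = ((l.getD k 0 : Nat) : Int) := by
  rw [List.getD_eq_getElem _ _ (by simpa using h), List.getElem_map,
    List.getD_eq_getElem _ _ h]

lemma B_eq (arr : List Int) (hne : ¬ arr.length = 0) (M : Int)
    (hM : PySem.List.max? arr (fun v => v) = some M) :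
    maxPeople_alt arr
      = (List.range (PPos arr M).length).foldl
          (fun (b : Int) (j : Nat) => max b (gapOf (PPos arr M) arr.length j)) 0 := by
  unfold maxPeople_alt
  simp only
  rw [if_neg hne, hM]
  simp only [Option.getD_some]
  rw [enum_filter_map M arr 0]
  rw [show ((List.range arr.length).filter (fun i => arr.getD i 0 == M)).map
        (fun (i : Nat) => (0 : Int) + (i : Int))
      = (PPos arr M).map (fun i : Nat => (i : Int)) from
    List.map_congr_left (by intro i _; simp)]
  rw [List.length_map]
  apply PySem.List.foldl_congr_mem
  intro b j hj
  simp only [List.mem_range] at hj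
  unfold gapOf
  have hhi : (if j + 1 < (PPos arr M).length
        then ((PPos arr M).map (fun i : Nat => (i : Int))).getD (j+1) 0
        else ((arr.length : Nat) : Int))
      = (if j + 1 < (PPos arr M).length
        then (((PPos arr M).getD (j+1) 0 : Nat) : Int) else ((arr.length : Nat) : Int)) := by
    rcases Nat.lt_or_ge (j+1) (PPos arr M).length with h | h
    · rw [if_pos h, if_pos h, getD_map_cast _ _ h]
    · rw [if_neg (by omega), if_neg (by omega)]
  have hlo : (if 0 < j then ((PPos arr M).map (fun i : Nat => (i : Int))).getD (j-1) 0 else (-1 : Int))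
      = (if 0 < j then (((PPos arr M).getD (j-1) 0 : Nat) : Int) else -1) := by
    rcases Nat.eq_zero_or_pos j with h | h
    · rw [if_neg (by omega), if_neg (by omega)]
    · rw [if_pos h, if_pos h, getD_map_cast _ _ (by omega)]
  rw [hhi, hlo]

-- ---- walkL / walkR at the maximum value M pick out consecutive maximum positions ----

lemma WL (arr : List Int) (M : Int) (hMle : ∀ i, i < arr.length → arr.getD i 0 ≤ M) :
    ∀ i, i ≤ arr.length → walkL arr M i = lastInt ((List.range i).filter (predM arr M)) := by
  intro i
  induction i with
  | zero => intro _; rfl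
  | succ i ih =>
      intro hi
      show (if arr.getD i 0 < M then walkL arr M i else (i : Int)) = _
      rw [List.range_succ, List.filter_append]
      by_cases hp : predM arr M i = true
      · have heq : arr.getD i 0 = M := by
          simpa [predM] using hp
        rw [if_neg (by omega), show List.filter (predM arr M) [i] = [i] by simp [hp]]
        unfold lastInt
        rw [List.getLast?_concat]
      · have hlt : arr.getD i 0 < M := by
          have hne : ¬ arr.getD i 0 = M := by simpa [predM] using hp
          exact lt_of_le_of_ne (hMle i (by omega)) hne
        rw [if_pos hlt, show List.filter (predM arr M) [i] = [] by simp [hp],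
          List.append_nil]
        exact ih (by omega)

lemma headR_head? (n : Nat) (l : List Nat) :
    headR n l = (match l.head? with | none => (n : Int) | some t => (t : Int)) := by
  cases l <;> rfl

lemma WR (arr : List Int) (M : Int) (hMle : ∀ i, i < arr.length → arr.getD i 0 ≤ M)
    (n : Nat) (hn : n = arr.length) :
    ∀ d k, n - k = d →
      walkR arr M n k = headR n ((List.range' k (n - k)).filter (predM arr M)) := by
  intro d
  induction d with
  | zero =>
      intro k hd
      rw [walkR, if_neg (by omega), hd]
      rfl
  | succ d ih =>
      intro k hd
      have hk : k < n := by omega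
      rw [walkR, if_pos hk, hd, List.range'_succ, List.filter_cons]
      by_cases hp : predM arr M k = true
      · have heq : arr.getD k 0 = M := by simpa [predM] using hp
        rw [if_neg (by omega), if_pos hp]
        rfl
      · have hlt : arr.getD k 0 < M := by
          have hne : ¬ arr.getD k 0 = M := by simpa [predM] using hp
          exact lt_of_le_of_ne (hMle k (by omega)) hne
        rw [if_pos hlt, if_neg hp, ih (k+1) (by omega)]
        rw [show n - (k+1) = d by omega]

-- ---- prefix/suffix splits of a sorted position list ----

lemma takeWhile_split {p : Nat → Bool} : ∀ (l1 l2 : List Nat),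
    (∀ x ∈ l1, p x = true) → (∀ x, l2.head? = some x → p x = false) →
    (l1 ++ l2).takeWhile p = l1 ∧ (l1 ++ l2).dropWhile p = l2 := by
  intro l1
  induction l1 with
  | nil =>
      intro l2 _ h2
      cases l2 with
      | nil => exact ⟨rfl, rfl⟩
      | cons b t =>
          simp only [List.nil_append, List.takeWhile_cons, List.dropWhile_cons,
            h2 b rfl]
          exact ⟨rfl, rfl⟩
  | cons a l1 ih =>
      intro l2 h1 h2
      have hpa := h1 a (by simp)
      have hih := ih l2 (fun x hx => h1 x (by simp [hx])) h2
      simp only [List.cons_append, List.takeWhile_cons, List.dropWhile_cons, hpa]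
      simp only [if_true]
      exact ⟨by rw [hih.1], hih.2⟩

lemma dropWhile_congr' {p q : Nat → Bool} : ∀ (l : List Nat),
    (∀ x ∈ l, p x = q x) → l.dropWhile p = l.dropWhile q := by
  intro l
  induction l with
  | nil => intro _; rfl
  | cons a t ih =>
      intro h
      have ha := h a (by simp)
      rw [List.dropWhile_cons, List.dropWhile_cons, ha]
      by_cases hq : q a = true
      · rw [if_pos hq, if_pos hq]
        exact ih (fun x hx => h x (by simp [hx]))
      · rw [if_neg hq, if_neg hq]

lemma range_split (n k : Nat) (h : k ≤ n) :
    List.range n = List.range k ++ List.range' k (n - k) := by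
  rw [List.range_eq_range', List.range_eq_range']
  have hap := List.range'_append (s := 0) (step := 1) (m := k) (n := n - k)
  simp only [Nat.zero_add, Nat.one_mul] at hap
  rw [hap]
  congr 1
  omega

lemma filterSplit (arr : List Int) (M : Int) (k : Nat) (hk : k ≤ arr.length) :
    (List.range k).filter (predM arr M) = (PPos arr M).takeWhile (fun x => x < k)
    ∧ (List.range' k (arr.length - k)).filter (predM arr M)
        = (PPos arr M).dropWhile (fun x => x < k) := by
  have hsplit : PPos arr M
      = (List.range k).filter (predM arr M)
        ++ (List.range' k (arr.length - k)).filter (predM arr M) := by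
    unfold PPos
    rw [range_split arr.length k hk, List.filter_append]
  have h1 : ∀ x ∈ (List.range k).filter (predM arr M), decide (x < k) = true := by
    intro x hx
    have := (List.mem_filter.mp hx).1
    simp only [List.mem_range] at this
    simpa using this
  have h2 : ∀ x, ((List.range' k (arr.length - k)).filter (predM arr M)).head? = some x →
      decide (x < k) = false := by
    intro x hx
    have hmem := (List.mem_filter.mp (List.mem_of_mem_head? hx)).1
    have := List.mem_range'.mp hmem
    simp only [decide_eq_false_iff_not]
    omega
  have h3 := takeWhile_split _ _ h1 h2
  rw [hsplit]
  exact ⟨h3.1.symm, h3.2.symm⟩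

lemma PP_sorted (arr : List Int) (M : Int) : (PPos arr M).Pairwise (· < ·) :=
  (List.pairwise_lt_range).filter _

lemma PP_mem {arr : List Int} {M : Int} {i : Nat} (h : i ∈ PPos arr M) :
    i < arr.length ∧ arr.getD i 0 = M := by
  have := List.mem_filter.mp h
  refine ⟨List.mem_range.mp this.1, ?_⟩
  simpa [predM] using this.2

lemma PP_take (arr : List Int) (M : Int) (j : Nat) (hj : j < (PPos arr M).length) :
    (PPos arr M).takeWhile (fun x => x < (PPos arr M).getD j 0) = (PPos arr M).take j
    ∧ (PPos arr M).dropWhile (fun x => x < (PPos arr M).getD j 0) = (PPos arr M).drop j := by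
  have hsorted := PP_sorted arr M
  have hgetj : (PPos arr M).getD j 0 = (PPos arr M)[j] := List.getD_eq_getElem _ _ hj
  have h1 : ∀ x ∈ (PPos arr M).take j, decide (x < (PPos arr M).getD j 0) = true := by
    intro x hx
    obtain ⟨i, hi, hx'⟩ := List.getElem_of_mem hx
    have hij : i < j := by
      have := hi
      simp only [List.length_take] at this
      omega
    rw [List.getElem_take] at hx'
    have := (List.pairwise_iff_getElem.mp hsorted) i j (by omega) hj hij
    rw [hgetj]
    simp only [decide_eq_true_eq]
    omega
  have h2 : ∀ x, ((PPos arr M).drop j).head? = some x →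
      decide (x < (PPos arr M).getD j 0) = false := by
    intro x hx
    rw [List.head?_drop] at hx
    have : (PPos arr M)[j]? = some (PPos arr M)[j] := List.getElem?_eq_getElem hj
    rw [this, Option.some_inj] at hx
    rw [hgetj, ← hx]
    simp
  have h3 := takeWhile_split _ _ h1 h2
  rw [List.take_append_drop] at h3
  exact h3

lemma PP_take_succ (arr : List Int) (M : Int) (j : Nat) (hj : j < (PPos arr M).length) :
    (PPos arr M).dropWhile (fun x => x < (PPos arr M).getD j 0 + 1)
      = (PPos arr M).drop (j+1) := by
  have hsorted := PP_sorted arr M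
  have hgetj : (PPos arr M).getD j 0 = (PPos arr M)[j] := List.getD_eq_getElem _ _ hj
  have h1 : ∀ x ∈ (PPos arr M).take (j+1), decide (x < (PPos arr M).getD j 0 + 1) = true := by
    intro x hx
    obtain ⟨i, hi, hx'⟩ := List.getElem_of_mem hx
    have hij : i < j + 1 := by
      have := hi
      simp only [List.length_take] at this
      omega
    rw [List.getElem_take] at hx'
    rw [hgetj]
    simp only [decide_eq_true_eq]
    rcases Nat.lt_or_ge i j with h | h
    · have := (List.pairwise_iff_getElem.mp hsorted) i j (by omega) hj h
      omega
    · have : i = j := by omega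
      subst this
      omega
  have h2 : ∀ x, ((PPos arr M).drop (j+1)).head? = some x →
      decide (x < (PPos arr M).getD j 0 + 1) = false := by
    intro x hx
    rw [List.head?_drop] at hx
    have hj1 : j + 1 < (PPos arr M).length := by
      rcases Nat.lt_or_ge (j+1) (PPos arr M).length with h | h
      · exact h
      · rw [List.getElem?_eq_none (by omega)] at hx
        exact absurd hx (by simp)
    rw [List.getElem?_eq_getElem hj1, Option.some_inj] at hx
    have := (List.pairwise_iff_getElem.mp hsorted) j (j+1) hj hj1 (by omega)
    rw [hgetj, ← hx]
    simp only [decide_eq_false_iff_not]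
    omega
  have h3 := takeWhile_split _ _ h1 h2
  rw [List.take_append_drop] at h3
  exact h3.2

lemma lastInt_take (l : List Nat) (j : Nat) (hj : j ≤ l.length) :
    lastInt (l.take j) = if 0 < j then ((l.getD (j-1) 0 : Nat) : Int) else -1 := by
  cases j with
  | zero => rfl
  | succ j' =>
      rw [if_pos (by omega)]
      unfold lastInt
      rw [List.getLast?_eq_getElem?]
      have hlen : (l.take (j'+1)).length = j' + 1 := by
        rw [List.length_take]
        omega
      rw [hlen]
      have hj' : j' < l.length := by omega
      rw [show j' + 1 - 1 = j' from rfl]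
      rw [List.getElem?_take_of_lt (by omega), List.getElem?_eq_getElem hj']
      simp only
      rw [List.getD_eq_getElem _ _ hj']

lemma headR_drop (n : Nat) (l : List Nat) (j : Nat) :
    headR n (l.drop j) = if j < l.length then ((l.getD j 0 : Nat) : Int) else (n : Int) := by
  rw [headR_head?, List.head?_drop]
  rcases Nat.lt_or_ge j l.length with h | h
  · rw [List.getElem?_eq_getElem h, if_pos h, List.getD_eq_getElem _ _ h]
  · rw [List.getElem?_eq_none (by omega), if_neg (by omega)]

-- ---- bounds and monotonicity of the walks ----

lemma walkL_le (arr : List Int) (x : Int) : ∀ i, walkL arr x i ≤ (i : Int) - 1 := by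
  intro i
  induction i with
  | zero => simp [walkL]
  | succ i ih =>
      show (if arr.getD i 0 < x then walkL arr x i else (i : Int)) ≤ _
      by_cases h : arr.getD i 0 < x
      · rw [if_pos h]
        push_cast
        omega
      · rw [if_neg h]
        push_cast
        omega

lemma walkL_mono (arr : List Int) {x y : Int} (hxy : x ≤ y) :
    ∀ i, walkL arr y i ≤ walkL arr x i := by
  intro i
  induction i with
  | zero => exact le_refl _
  | succ i ih =>
      show (if arr.getD i 0 < y then walkL arr y i else (i : Int))
        ≤ (if arr.getD i 0 < x then walkL arr x i else (i : Int))
      by_cases hy : arr.getD i 0 < y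
      · by_cases hx : arr.getD i 0 < x
        · rw [if_pos hy, if_pos hx]
          exact ih
        · rw [if_pos hy, if_neg hx]
          have := walkL_le arr y i
          omega
      · have hx : ¬ arr.getD i 0 < x := by omega
        rw [if_neg hy, if_neg hx]

lemma walkR_ge (arr : List Int) (x : Int) (n : Nat) :
    ∀ d k, n - k = d → k ≤ n → (k : Int) ≤ walkR arr x n k := by
  intro d
  induction d with
  | zero =>
      intro k hd hk
      rw [walkR, if_neg (by omega)]
      omega
  | succ d ih =>
      intro k hd hk
      have hk' : k < n := by omega
      have hx : walkR arr x n k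
          = if arr.getD k 0 < x then walkR arr x n (k+1) else (k : Int) := by
        rw [walkR, if_pos hk']
      rw [hx]
      by_cases h : arr.getD k 0 < x
      · rw [if_pos h]
        have := ih (k+1) (by omega) (by omega)
        push_cast at this ⊢
        omega
      · rw [if_neg h]

lemma walkR_mono (arr : List Int) {x y : Int} (hxy : x ≤ y) (n : Nat) :
    ∀ d k, n - k = d → walkR arr x n k ≤ walkR arr y n k := by
  intro d
  induction d with
  | zero =>
      intro k hd
      rw [walkR, if_neg (by omega), walkR, if_neg (by omega)]
  | succ d ih =>
      intro k hd
      have hk' : k < n := by omega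
      have ex : walkR arr x n k
          = if arr.getD k 0 < x then walkR arr x n (k+1) else (k : Int) := by
        rw [walkR, if_pos hk']
      have ey : walkR arr y n k
          = if arr.getD k 0 < y then walkR arr y n (k+1) else (k : Int) := by
        rw [walkR, if_pos hk']
      rw [ex, ey]
      by_cases hx : arr.getD k 0 < x
      · rw [if_pos hx, if_pos (by omega : arr.getD k 0 < y)]
        exact ih (k+1) (by omega)
      · rw [if_neg hx]
        by_cases hy : arr.getD k 0 < y
        · rw [if_pos hy]
          have := walkR_ge arr y n (n - (k+1)) (k+1) rfl (by omega)
          push_cast at this ⊢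
          omega
        · rw [if_neg hy]

-- ---- the window of a maximum position is exactly B's gap ----

lemma centralL (arr : List Int) (M : Int) (hMle : ∀ i, i < arr.length → arr.getD i 0 ≤ M)
    (j : Nat) (hj : j < (PPos arr M).length) :
    walkL arr M ((PPos arr M).getD j 0)
      = if 0 < j then (((PPos arr M).getD (j-1) 0 : Nat) : Int) else -1 := by
  have hjn : (PPos arr M).getD j 0 < arr.length := by
    have hmem : (PPos arr M).getD j 0 ∈ PPos arr M := by
      rw [List.getD_eq_getElem _ _ hj]
      exact List.getElem_mem _
    exact (PP_mem hmem).1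
  rw [WL arr M hMle _ (by omega)]
  rw [(filterSplit arr M _ (by omega)).1]
  rw [(PP_take arr M j hj).1]
  exact lastInt_take _ _ (by omega)

lemma centralR (arr : List Int) (M : Int) (hMle : ∀ i, i < arr.length → arr.getD i 0 ≤ M)
    (j : Nat) (hj : j < (PPos arr M).length) :
    walkR arr M arr.length ((PPos arr M).getD j 0 + 1)
      = if j + 1 < (PPos arr M).length
        then (((PPos arr M).getD (j+1) 0 : Nat) : Int) else ((arr.length : Nat) : Int) := by
  have hjn : (PPos arr M).getD j 0 < arr.length := by
    have hmem : (PPos arr M).getD j 0 ∈ PPos arr M := by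
      rw [List.getD_eq_getElem _ _ hj]
      exact List.getElem_mem _
    exact (PP_mem hmem).1
  rw [WR arr M hMle arr.length rfl _ ((PPos arr M).getD j 0 + 1) rfl]
  rw [(filterSplit arr M _ (by omega)).2]
  rw [PP_take_succ arr M j hj]
  rw [headR_drop]

lemma central (arr : List Int) (M : Int) (hMle : ∀ i, i < arr.length → arr.getD i 0 ≤ M)
    (j : Nat) (hj : j < (PPos arr M).length) :
    span arr ((PPos arr M).getD j 0) = gapOf (PPos arr M) arr.length j := by
  have hmem : (PPos arr M).getD j 0 ∈ PPos arr M := by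
    rw [List.getD_eq_getElem _ _ hj]
    exact List.getElem_mem _
  have hval : arr.getD ((PPos arr M).getD j 0) 0 = M := (PP_mem hmem).2
  unfold span gapOf
  rw [hval]
  rw [centralL arr M hMle j hj]
  rw [centralR arr M hMle j hj]

-- ---- every window is dominated by the gap of a neighbouring maximum position ----

lemma dominance (arr : List Int) (M : Int) (hMle : ∀ i, i < arr.length → arr.getD i 0 ≤ M)
    (hPPne : PPos arr M ≠ []) (i : Nat) (hi : i < arr.length) :
    ∃ j, j < (PPos arr M).length ∧ span arr i ≤ gapOf (PPos arr M) arr.length j := by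
  have hsorted := PP_sorted arr M
  have hx : arr.getD i 0 ≤ M := hMle i hi
  have hL : walkL arr M i ≤ walkL arr (arr.getD i 0) i := walkL_mono arr hx i
  have hR : walkR arr (arr.getD i 0) arr.length (i+1) ≤ walkR arr M arr.length (i+1) :=
    walkR_mono arr hx arr.length (arr.length - (i+1)) (i+1) rfl
  have hspan : span arr i ≤ walkR arr M arr.length (i+1) - walkL arr M i - 1 := by
    unfold span
    omega
  by_cases hmem : i ∈ PPos arr M
  · obtain ⟨j, hj, hij⟩ := List.mem_iff_getElem.mp hmem
    refine ⟨j, hj, ?_⟩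
    have hgd : (PPos arr M).getD j 0 = i := by
      rw [List.getD_eq_getElem _ _ hj, hij]
    rw [← central arr M hMle j hj, hgd]
  · -- i is not a maximum position
    have hLi : walkL arr M i = lastInt ((PPos arr M).takeWhile (fun x => x < i)) := by
      rw [WL arr M hMle i (by omega), (filterSplit arr M i (by omega)).1]
    have hRi : walkR arr M arr.length (i+1)
        = headR arr.length ((PPos arr M).dropWhile (fun x => x < i)) := by
      rw [WR arr M hMle arr.length rfl _ (i+1) rfl, (filterSplit arr M (i+1) (by omega)).2]
      congr 1
      apply dropWhile_congr'
      intro x hxm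
      have hxi : x ≠ i := by
        intro h
        exact hmem (h ▸ hxm)
      simp only [decide_eq_decide]
      omega
    -- the takeWhile prefix is a take, the dropWhile suffix the matching drop
    have hpre : (PPos arr M).takeWhile (fun x => x < i)
        = (PPos arr M).take ((PPos arr M).takeWhile (fun x => x < i)).length := by
      exact (List.prefix_iff_eq_take.mp (List.takeWhile_prefix _))
    set j0 := ((PPos arr M).takeWhile (fun x => x < i)).length with hj0def
    have hj0le : j0 ≤ (PPos arr M).length := by
      rw [hj0def]
      have := (List.takeWhile_prefix (p := fun x => decide (x < i)) (l := PPos arr M)).length_le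
      omega
    have hdrop : (PPos arr M).dropWhile (fun x => x < i) = (PPos arr M).drop j0 := by
      have h1 : (PPos arr M).takeWhile (fun x => x < i)
          ++ (PPos arr M).dropWhile (fun x => x < i) = PPos arr M :=
        List.takeWhile_append_dropWhile
      have h2 : (PPos arr M).take j0 ++ (PPos arr M).drop j0 = PPos arr M :=
        List.take_append_drop _ _
      rw [hpre] at h1
      exact List.append_cancel_left (h1.trans h2.symm)
    have hm : 0 < (PPos arr M).length := List.length_pos_iff.mpr hPPne
    rcases Nat.eq_zero_or_pos j0 with hj00 | hj0pos
    · -- no maximum position below i: the window lies before the first maximum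
      refine ⟨0, hm, ?_⟩
      have hL0 : walkL arr M i = -1 := by
        rw [hLi, hpre, hj00]
        rfl
      have hR0 : walkR arr M arr.length (i+1) = (((PPos arr M).getD 0 0 : Nat) : Int) := by
        rw [hRi, hdrop, hj00, headR_drop, if_pos hm]
      have hgap : gapOf (PPos arr M) arr.length 0
          = (if 0 + 1 < (PPos arr M).length
              then (((PPos arr M).getD 1 0 : Nat) : Int) else ((arr.length : Nat) : Int)) + 1 - 1 := by
        unfold gapOf
        norm_num
      -- PP[0] < the gap's upper end
      have hub : ((PPos arr M).getD 0 0 : Int)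
          < (if 0 + 1 < (PPos arr M).length
              then (((PPos arr M).getD 1 0 : Nat) : Int) else ((arr.length : Nat) : Int)) := by
        rcases Nat.lt_or_ge 1 (PPos arr M).length with h | h
        · rw [if_pos h]
          have := (List.pairwise_iff_getElem.mp hsorted) 0 1 (by omega) h (by omega)
          rw [List.getD_eq_getElem _ _ (by omega : 0 < (PPos arr M).length),
            List.getD_eq_getElem _ _ h]
          exact_mod_cast this
        · rw [if_neg (by omega)]
          have hmem0 : (PPos arr M).getD 0 0 ∈ PPos arr M := by
            rw [List.getD_eq_getElem _ _ (by omega)]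
            exact List.getElem_mem _
          exact_mod_cast (PP_mem hmem0).1
      rw [hgap]
      rw [hL0, hR0] at hspan
      omega
    · -- PP[j0-1] is the nearest maximum position below i
      refine ⟨j0 - 1, by omega, ?_⟩
      have hLj : walkL arr M i = (((PPos arr M).getD (j0-1) 0 : Nat) : Int) := by
        rw [hLi, hpre, lastInt_take _ _ hj0le, if_pos hj0pos]
      have hRj : walkR arr M arr.length (i+1)
          = (if j0 < (PPos arr M).length
              then (((PPos arr M).getD j0 0 : Nat) : Int) else ((arr.length : Nat) : Int)) := by
        rw [hRi, hdrop, headR_drop]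
      have hgap : gapOf (PPos arr M) arr.length (j0-1)
          = (if j0 - 1 + 1 < (PPos arr M).length
              then (((PPos arr M).getD (j0-1+1) 0 : Nat) : Int) else ((arr.length : Nat) : Int))
            - (if 0 < j0 - 1 then (((PPos arr M).getD (j0-1-1) 0 : Nat) : Int) else -1) - 1 := rfl
      have hj0s : j0 - 1 + 1 = j0 := by omega
      -- the lower end of the gap is at most PP[j0-1] - 1
      have hlb : (if 0 < j0 - 1 then (((PPos arr M).getD (j0-1-1) 0 : Nat) : Int) else -1)
          ≤ ((PPos arr M).getD (j0-1) 0 : Int) - 1 := by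
        rcases Nat.eq_zero_or_pos (j0 - 1) with h | h
        · rw [if_neg (by omega)]
          have : (0 : Int) ≤ ((PPos arr M).getD (j0-1) 0 : Int) := by positivity
          omega
        · rw [if_pos h]
          have hp := (List.pairwise_iff_getElem.mp hsorted) (j0-1-1) (j0-1)
            (by omega) (by omega) (by omega)
          rw [List.getD_eq_getElem _ _ (by omega : j0-1-1 < (PPos arr M).length),
            List.getD_eq_getElem _ _ (by omega : j0-1 < (PPos arr M).length)]
          omega
      rw [hgap, hj0s]
      rw [hLj, hRj] at hspan
      omega

-- ---- folded maxima ----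

lemma foldl_max_le (f : Nat → Int) (c : Int) : ∀ (l : List Nat) (init : Int),
    init ≤ c → (∀ x ∈ l, f x ≤ c) → l.foldl (fun a x => max a (f x)) init ≤ c := by
  intro l
  induction l with
  | nil => intro init h0 _; simpa using h0
  | cons a t ih =>
      intro init h0 hl
      rw [List.foldl_cons]
      exact ih _ (max_le h0 (hl a (by simp))) (fun x hx => hl x (by simp [hx]))

-- ===== VERDICT (by name: the statement is the Claim_ definition above) =====
theorem maxPeople_spec : Claim_equal_maxPeople := by
  unfold Claim_equal_maxPeople
  intro arr _
  unfold Spec_maxPeople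
  rcases Nat.eq_zero_or_pos arr.length with h0 | hpos
  · have harr : arr = [] := List.eq_nil_of_length_eq_zero h0
    subst harr
    rfl
  · obtain ⟨M, hM⟩ : ∃ M, PySem.List.max? arr (fun v => v) = some M := by
      cases hcase : PySem.List.max? arr (fun v => v) with
      | none =>
          exfalso
          have h := (PySem.List.max?_eq_none_iff arr (fun v => v)).mp hcase
          rw [h] at hpos
          simp at hpos
      | some M => exact ⟨M, rfl⟩
    have hMle : ∀ i, i < arr.length → arr.getD i 0 ≤ M := by
      intro i hi
      have hmem : arr.getD i 0 ∈ arr := by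
        rw [List.getD_eq_getElem _ _ hi]
        exact List.getElem_mem _
      exact PySem.List.max?_isMax hM _ hmem
    have hMmem : M ∈ arr := PySem.List.max?_mem hM
    have hPPne : PPos arr M ≠ [] := by
      obtain ⟨idx, hidx, heq⟩ := List.mem_iff_getElem.mp hMmem
      intro hnil
      have hin : idx ∈ PPos arr M := by
        unfold PPos predM
        rw [List.mem_filter]
        refine ⟨List.mem_range.mpr hidx, ?_⟩
        rw [List.getD_eq_getElem _ _ hidx, heq]
        simp
      rw [hnil] at hin
      simp at hin
    rw [A_eq, B_eq arr (by omega) M hM]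
    have hBbound := PySem.List.le_foldl_max_int (List.range (PPos arr M).length)
        (fun j => gapOf (PPos arr M) arr.length j) 0
    have hAbound := PySem.List.le_foldl_max_int (List.range arr.length)
        (fun i => span arr i) 0
    apply le_antisymm
    · apply foldl_max_le
      · exact hBbound.1
      · intro i hi
        obtain ⟨j, hj, hle⟩ := dominance arr M hMle hPPne i (List.mem_range.mp hi)
        exact le_trans hle (hBbound.2 j (List.mem_range.mpr hj))
    · apply foldl_max_le
      · exact hAbound.1
      · intro j hjmem
        have hj := List.mem_range.mp hjmem
        have hjn : (PPos arr M).getD j 0 < arr.length := by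
          have hmm : (PPos arr M).getD j 0 ∈ PPos arr M := by
            rw [List.getD_eq_getElem _ _ hj]
            exact List.getElem_mem _
          exact (PP_mem hmm).1
        rw [← central arr M hMle j hj]
        exact hAbound.2 _ (List.mem_range.mpr hjn)
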